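-- pv_equiv track=rewrite | github.com/bearisbug-ovo/Motif | backend/routers/media.py | _reorder_with_children
-- ===== SOURCE A (Python) =====
-- def _reorder_with_children(items: list) -> list:
--     """Reorder a flat media list so that children follow their parent in DFS order.
--
--     Root items (no parent_media_id, or parent not in list) keep their original
--     relative order.  Children of the same parent are sorted by created_at asc.
--     """
--     id_set = {item["id"] for item in items}
--     children_map: dict[str, list] = {}
--     roots: list = []
--
--     for item in items:
--         pid = item.get("parent_media_id")
--         if pid and pid in id_set:
--             children_map.setdefault(pid, []).append(item)
--         else:
--             roots.append(item)
--
--     # Sort children by created_at so siblings are chronological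
--     for pid in children_map:
--         children_map[pid].sort(key=lambda x: x.get("created_at", ""))
--
--     result: list = []
--
--     def _dfs(item: dict) -> None:
--         result.append(item)
--         for child in children_map.get(item["id"], []):
--             _dfs(child)
--
--     for root in roots:
--         _dfs(root)
--
--     return result
-- ===== SOURCE B (Python) =====
-- def _reorder_with_children(items: list) -> list:
--     """Iterative re-implementation: same parent/child classification, but the
--     recursive DFS is replaced by an explicit stack (pre-order, children pushed
--     in reverse so they pop chronologically)."""
--     ids = {it["id"] for it in items}
--
--     def _is_child(it) -> bool:
--         pid = it.get("parent_media_id")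
--         return bool(pid) and pid in ids
--
--     kids: dict = {}
--     for it in items:
--         if _is_child(it):
--             kids.setdefault(it["parent_media_id"], []).append(it)
--
--     for lst in kids.values():
--         lst.sort(key=lambda x: x.get("created_at", ""))
--
--     stack = [it for it in items if not _is_child(it)]
--     stack.reverse()
--
--     out: list = []
--     while stack:
--         it = stack.pop()
--         out.append(it)
--         out_children = kids.get(it["id"], [])
--         stack.extend(reversed(out_children))
--     return out
-- ===== Notes on version B (the rewrite author's own statement) =====
-- stated objective: alternative
-- what changed: The recursive _dfs with a shared result accumulator is replaced by an explicit-stack iterative pre-order loop (roots reversed onto a stack, children pushed in reverse), and the single classify-pass with an else-branch is replaced by two filters.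
import Mathlib
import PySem

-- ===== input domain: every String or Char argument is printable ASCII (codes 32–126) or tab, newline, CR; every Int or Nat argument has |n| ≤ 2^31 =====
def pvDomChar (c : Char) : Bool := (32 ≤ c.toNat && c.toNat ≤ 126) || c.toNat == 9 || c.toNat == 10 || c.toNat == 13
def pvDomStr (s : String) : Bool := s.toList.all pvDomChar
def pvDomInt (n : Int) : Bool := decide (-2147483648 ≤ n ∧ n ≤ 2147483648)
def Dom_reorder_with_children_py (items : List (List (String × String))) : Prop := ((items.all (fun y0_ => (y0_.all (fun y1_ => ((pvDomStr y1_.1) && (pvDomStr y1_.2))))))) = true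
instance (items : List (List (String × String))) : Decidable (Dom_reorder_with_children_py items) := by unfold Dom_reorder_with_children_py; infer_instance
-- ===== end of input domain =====

-- B replaces A's recursive DFS with an explicit stack loop (same classification of
-- roots/children, same per-parent sort); equal return value on Pre_ (A does not mutate its argument's list).

-- shared item-as-dict accessors (each Python item is a dict)
def pvItemGet (it : List (String × String)) (k : String) : Option String :=
  (PySem.Dict.ofList it).get? k

def pvId (it : List (String × String)) : String := (pvItemGet it "id").getD ""

def pvCreated (it : List (String × String)) : String := (pvItemGet it "created_at").getD ""

def pvPid (it : List (String × String)) : Option String := pvItemGet it "parent_media_id"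

-- ===== PORT A =====
-- _dfs: the recursion carries the shared `result` accumulator; the fuel items.length + 1
-- bounds the recursion depth (under Pre_ the depth stays below it; Python's own
-- recursion is unbounded up to RecursionError)
def pvDfsA (cm : PySem.Dict String (List (List (String × String)))) :
    Nat → List (String × String) → List (List (String × String)) → List (List (String × String))
  | 0, _, res => res
  | f + 1, it, res =>
      (cm.getD (pvId it) []).foldl (fun r c => pvDfsA cm f c r) (res ++ [it])

def reorder_with_children_py (items : List (List (String × String))) : List (List (String × String)) :=
  let id_set : PySem.Set String := PySem.Set.ofList (items.map pvId)
  let st := items.foldl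
    (fun (st : PySem.Dict String (List (List (String × String))) × List (List (String × String))) it =>
      match pvPid it with
      | some pid =>
          if pid != "" && PySem.Set.contains id_set pid then
            (st.1.modify pid [] (· ++ [it]), st.2)
          else (st.1, st.2 ++ [it])
      | none => (st.1, st.2 ++ [it]))
    (PySem.Dict.empty, [])
  let cm := st.1.keys.foldl
    (fun m k => m.insert k (PySem.List.sorted (m.getD k []) pvCreated)) st.1
  st.2.foldl (fun res root => pvDfsA cm (items.length + 1) root res) []

-- ===== PORT B =====
def pvIsChild (ids : PySem.Set String) (it : List (String × String)) : Bool :=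
  match pvPid it with
  | some p => p != "" && PySem.Set.contains ids p
  | none => false

-- the while loop; the Lean list's head is the Python stack's top (Python pops/extends at
-- the end), so `reversed(children) pushed` pops as `children ++ rest`; the fuel only
-- bounds the number of iterations (under Pre_ each item is popped at most once, so any
-- sufficiently large fuel — we take (|items|+1)^(|items|+2) — yields the loop's value)
def pvLoopB (cm : PySem.Dict String (List (List (String × String)))) :
    Nat → List (List (String × String)) → List (List (String × String)) → List (List (String × String))
  | _, [], out => out
  | 0, _ :: _, out => out
  | f + 1, it :: rest, out => pvLoopB cm f (cm.getD (pvId it) [] ++ rest) (out ++ [it])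

def reorder_with_children_py_alt (items : List (List (String × String))) : List (List (String × String)) :=
  let ids : PySem.Set String := PySem.Set.ofList (items.map pvId)
  let kids := (items.filter (pvIsChild ids)).foldl
    (fun m it => m.modify ((pvPid it).getD "") [] (· ++ [it])) PySem.Dict.empty
  let kids := PySem.Dict.mk
    (kids.items.map (fun kv => (kv.1, PySem.List.sorted kv.2 pvCreated)))
  let roots := items.filter (fun it => !pvIsChild ids it)
  pvLoopB kids ((items.length + 1) ^ (items.length + 2)) roots []

-- ===== PRECONDITION & SPEC =====
-- Pre_ excludes (a) items without an "id" key, where A raises KeyError, and (b) lists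
-- with duplicate id values, on which A can recurse forever (RecursionError) and whose
-- accidental set/dict collapsing no caller would specify.
def Pre_reorder_with_children_py (items : List (List (String × String))) : Prop :=
  (∀ it ∈ items, (pvItemGet it "id").isSome = true) ∧ (items.map pvId).Nodup

instance (items : List (List (String × String))) : Decidable (Pre_reorder_with_children_py items) := by
  unfold Pre_reorder_with_children_py; infer_instance

def pvWitness_reorder_with_children_py : (List (List (String × String))) :=
  [[("id", "a")], [("id", "b"), ("parent_media_id", "a"), ("created_at", "1")]]

def Spec_reorder_with_children_py (items : List (List (String × String))) (out : List (List (String × String))) : Prop := out = reorder_with_children_py_alt items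
instance (items : List (List (String × String))) (out : List (List (String × String))) : Decidable (Spec_reorder_with_children_py items out) := by unfold Spec_reorder_with_children_py; infer_instance

-- ===== CLAIM (what is proved, stated in full; the proofs are below) =====
def Claim_equal_reorder_with_children_py : Prop := ∀ (items : List (List (String × String))), Dom_reorder_with_children_py items → Pre_reorder_with_children_py items → Spec_reorder_with_children_py items (reorder_with_children_py items)

-- ===== LEMMAS AND PROOFS =====

-- the id set, the pre-sort children dict (exactly B's first fold) and the root list
def pvIds (items : List (List (String × String))) : PySem.Set String :=
  PySem.Set.ofList (items.map pvId)

def pvCmPre (items : List (List (String × String))) :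
    PySem.Dict String (List (List (String × String))) :=
  (items.filter (pvIsChild (pvIds items))).foldl
    (fun m it => m.modify ((pvPid it).getD "") [] (· ++ [it])) PySem.Dict.empty

def pvRoots (items : List (List (String × String))) : List (List (String × String)) :=
  items.filter (fun it => !pvIsChild (pvIds items) it)

-- canonical children list of the id `c`: the child items whose parent is `c`, sorted by created_at
def pvChl (items : List (List (String × String))) (c : String) : List (List (String × String)) :=
  PySem.List.sorted
    ((items.filter (pvIsChild (pvIds items))).filter (fun it => (pvPid it).getD "" == c))
    pvCreated

def pvChildF (items : List (List (String × String))) (x : List (String × String)) :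
    List (List (String × String)) := pvChl items (pvId x)

-- ancestor chains of the DFS, bottom (current item) first
inductive PvChain (items : List (List (String × String))) : List (List (String × String)) → Prop
  | root (x : List (String × String)) (hx : x ∈ items)
      (hr : pvIsChild (pvIds items) x = false) : PvChain items [x]
  | step (y x : List (String × String)) (ch : List (List (String × String)))
      (h : PvChain items (x :: ch)) (hy : y ∈ pvChildF items x) : PvChain items (y :: x :: ch)

-- A's one-pass classification step is the `pvIsChild` test
theorem pv_stepA_eq (ids : PySem.Set String)
    (st : PySem.Dict String (List (List (String × String))) × List (List (String × String)))
    (it : List (String × String)) :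
    (match pvPid it with
      | some pid =>
          if pid != "" && PySem.Set.contains ids pid then
            (st.1.modify pid [] (· ++ [it]), st.2)
          else (st.1, st.2 ++ [it])
      | none => (st.1, st.2 ++ [it]))
    = (if pvIsChild ids it then (st.1.modify ((pvPid it).getD "") [] (· ++ [it]), st.2)
       else (st.1, st.2 ++ [it])) := by
  unfold pvIsChild
  cases h : pvPid it <;> simp

-- a fold over a (dict, list) pair splits into two independent folds
theorem pv_pair_fold (p : List (String × String) → Bool)
    (g : PySem.Dict String (List (List (String × String))) → List (String × String) →
      PySem.Dict String (List (List (String × String)))) :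
    ∀ (l : List (List (String × String)))
      (d : PySem.Dict String (List (List (String × String)))) (r : List (List (String × String))),
      l.foldl (fun st it => if p it then (g st.1 it, st.2) else (st.1, st.2 ++ [it])) (d, r)
        = (l.foldl (fun m it => if p it then g m it else m) d, r ++ l.filter (fun it => !p it))
  | [], d, r => by simp
  | a :: l, d, r => by
      by_cases h : p a = true
      · simp only [List.foldl_cons, h, if_true, List.filter_cons, Bool.not_true]
        rw [pv_pair_fold p g l]
        simp
      · simp only [List.foldl_cons, h, if_false, List.filter_cons, Bool.not_false,
          Bool.false_eq_true]
        rw [pv_pair_fold p g l]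
        simp

theorem pv_cmPre_getD (items : List (List (String × String))) (c : String) :
    (pvCmPre items).getD c []
      = (items.filter (pvIsChild (pvIds items))).filter (fun it => (pvPid it).getD "" == c) := by
  unfold pvCmPre
  have h1 : ∀ (l : List (List (String × String))),
      l.foldl (fun m it => m.modify ((pvPid it).getD "") [] (· ++ [it])) PySem.Dict.empty
        = (l.map (fun it => ((pvPid it).getD "", it))).foldl
            (fun d p => d.modify p.1 [] (· ++ [p.2])) PySem.Dict.empty := by
    intro l; rw [List.foldl_map]
  rw [h1]
  rw [PySem.Dict.getD_foldl_modify_append, List.filter_map, List.map_map]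
  simp [Function.comp_def]

theorem pv_cmPre_keys (items : List (List (String × String))) :
    (pvCmPre items).keys
      = PySem.Set.ofList ((items.filter (pvIsChild (pvIds items))).map (fun it => (pvPid it).getD "")) := by
  unfold pvCmPre
  rw [PySem.Dict.keys_foldl_modify_key _ (fun it => (pvPid it).getD "") [] (fun _ it v => v ++ [it])]
  simp [PySem.Set.update_nil_left]

theorem pv_cmPre_keys_nodup (items : List (List (String × String))) :
    (pvCmPre items).keys.Nodup := by
  unfold pvCmPre
  exact PySem.Dict.nodup_keys_foldl_modify_key _ (fun it => (pvPid it).getD "") []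
    (fun _ it v => v ++ [it]) _ (by simp)

-- not a key of the pre-sort dict: no item has that parent
theorem pv_not_key_filter_nil (items : List (List (String × String))) (c : String)
    (hc : c ∉ (pvCmPre items).keys) :
    (items.filter (pvIsChild (pvIds items))).filter (fun it => (pvPid it).getD "" == c) = [] := by
  rw [pv_cmPre_keys] at hc
  rw [List.filter_eq_nil_iff]
  intro it hit hbeq
  exact hc ((PySem.Set.mem_ofList _ _).mpr (List.mem_map.mpr ⟨it, hit, eq_of_beq hbeq⟩))

-- A's in-place per-key sorting pass, characterised by lookup
theorem pv_sortfold (ks : List String) (hnd : ks.Nodup) :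
    ∀ (m : PySem.Dict String (List (List (String × String)))) (c : String),
    (ks.foldl (fun m k => m.insert k (PySem.List.sorted (m.getD k []) pvCreated)) m).getD c []
      = if c ∈ ks then PySem.List.sorted (m.getD c []) pvCreated else m.getD c [] := by
  induction ks with
  | nil => intro m c; simp
  | cons k ks ih =>
      intro m c
      simp only [List.foldl_cons]
      rw [ih (List.Nodup.of_cons hnd)]
      by_cases hck : c = k
      · subst hck
        have hnotin : c ∉ ks := (List.nodup_cons.mp hnd).1
        simp [hnotin]
      · by_cases hin : c ∈ ks <;> simp [hin, hck, PySem.Dict.getD_insert]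

-- A's final children dict
def pvCmA (items : List (List (String × String))) :
    PySem.Dict String (List (List (String × String))) :=
  (pvCmPre items).keys.foldl
    (fun m k => m.insert k (PySem.List.sorted (m.getD k []) pvCreated)) (pvCmPre items)

theorem pv_cmA_getD (items : List (List (String × String))) (c : String) :
    (pvCmA items).getD c [] = pvChl items c := by
  unfold pvCmA pvChl
  rw [pv_sortfold _ (pv_cmPre_keys_nodup items)]
  by_cases hc : c ∈ (pvCmPre items).keys
  · simp [hc, pv_cmPre_getD]
  · simp only [hc, if_false]
    rw [pv_cmPre_getD, pv_not_key_filter_nil items c hc]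
    exact ((PySem.List.sorted_eq_nil_iff _ _ _).mpr rfl).symm

-- B's value-sorting pass, entry by entry
theorem pv_mk_sorted_get? (l : List (String × List (List (String × String)))) (c : String) :
    (PySem.Dict.mk (l.map (fun kv => (kv.1, PySem.List.sorted kv.2 pvCreated)))).get? c
      = ((PySem.Dict.mk l).get? c).map (fun v => PySem.List.sorted v pvCreated) := by
  induction l with
  | nil => simp [PySem.Dict.get?]
  | cons kv rest ih =>
      obtain ⟨k, v⟩ := kv
      simp only [List.map_cons, PySem.Dict.get?_mk_cons]
      by_cases h : (k == c) = true <;> simp [h, ih]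

-- B's final children dict
def pvCmB (items : List (List (String × String))) :
    PySem.Dict String (List (List (String × String))) :=
  PySem.Dict.mk ((pvCmPre items).items.map (fun kv => (kv.1, PySem.List.sorted kv.2 pvCreated)))

theorem pv_cmB_getD (items : List (List (String × String))) (c : String) :
    (pvCmB items).getD c [] = pvChl items c := by
  unfold pvCmB
  rw [PySem.Dict.getD_eq_get?_getD, pv_mk_sorted_get?]
  have hmk : PySem.Dict.mk (pvCmPre items).items = pvCmPre items := rfl
  rw [hmk]
  unfold pvChl
  cases hg : (pvCmPre items).get? c with
  | some v =>
      have : (pvCmPre items).getD c [] = v := by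
        rw [PySem.Dict.getD_eq_get?_getD, hg]; rfl
      rw [← this, pv_cmPre_getD]
      rfl
  | none =>
      have hc : c ∉ (pvCmPre items).keys :=
        (PySem.Dict.get?_eq_none_iff_not_mem_keys _ _).mp hg
      rw [pv_not_key_filter_nil items c hc]
      exact ((PySem.List.sorted_eq_nil_iff _ _ _).mpr rfl).symm

-- membership in a children list
theorem pv_childF_mem (items : List (List (String × String))) (x y : List (String × String))
    (hy : y ∈ pvChildF items x) :
    y ∈ items ∧ pvIsChild (pvIds items) y = true ∧ (pvPid y).getD "" = pvId x := by
  unfold pvChildF pvChl at hy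
  rw [PySem.List.mem_sorted] at hy
  simp only [List.mem_filter, beq_iff_eq] at hy
  exact ⟨hy.1.1, hy.1.2, hy.2⟩

-- distinct ids make pvId injective on the list
theorem pv_inj (items : List (List (String × String))) (hnd : (items.map pvId).Nodup)
    {a b : List (String × String)} (ha : a ∈ items) (hb : b ∈ items) (h : pvId a = pvId b) :
    a = b :=
  List.inj_on_of_nodup_map hnd ha hb h

theorem pv_chain_mem {items l} (h : PvChain items l) : ∀ a ∈ l, a ∈ items := by
  induction h with
  | root x hx hr =>
      intro a ha; rw [List.mem_singleton] at ha; subst ha; exact hx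
  | step y x ch h hy ih =>
      intro a ha
      rcases List.mem_cons.mp ha with rfl | ha
      · exact (pv_childF_mem items x a hy).1
      · exact ih a ha

-- every chain element is a root (bottom) or some chain element's child
theorem pv_chain_struct {items l} (h : PvChain items l) :
    ∀ a ∈ l, pvIsChild (pvIds items) a = false ∨ ∃ b ∈ l, a ∈ pvChildF items b := by
  induction h with
  | root x hx hr =>
      intro a ha; rw [List.mem_singleton] at ha; subst ha; exact Or.inl hr
  | step y x ch h hy ih =>
      intro a ha
      rcases List.mem_cons.mp ha with rfl | ha
      · exact Or.inr ⟨x, by simp, hy⟩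
      · rcases ih a ha with h' | ⟨b, hb, hab⟩
        · exact Or.inl h'
        · exact Or.inr ⟨b, List.mem_cons_of_mem _ hb, hab⟩

-- a child of the chain's bottom item is fresh: it is on no chain through it
theorem pv_chain_fresh {items : List (List (String × String))}
    (hnd : (items.map pvId).Nodup) {l} (h : PvChain items l) :
    ∀ y ∈ pvChildF items l.headI, y ∉ l := by
  induction h with
  | root x hx hr =>
      intro y hy hmem
      rw [List.mem_singleton] at hmem
      have hchild := (pv_childF_mem items _ y hy).2.1
      rw [hmem, hr] at hchild
      exact Bool.noConfusion hchild
  | step y x ch h hy ih =>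
      intro w hw hmem
      obtain ⟨hwitems, hwchild, hwpid⟩ := pv_childF_mem items y w hw
      obtain ⟨hyitems, hychild, hypid⟩ := pv_childF_mem items x y hy
      have ihx : ∀ z ∈ pvChildF items x, z ∉ x :: ch := by
        intro z hz; exact ih z hz
      rcases List.mem_cons.mp hmem with hwy | hmem'
      · -- w = y: then y's parent id is its own id and also x's id
        have hxitems : x ∈ items := pv_chain_mem h x (by simp)
        have e1 : (pvPid y).getD "" = pvId y := hwy ▸ hwpid
        have hyx : y = x := pv_inj items hnd hyitems hxitems (e1.symm.trans hypid)
        exact ihx y hy (by rw [hyx]; simp)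
      · -- w occurs in the chain x :: ch
        rcases pv_chain_struct h w hmem' with hfalse | ⟨b, hb, hwb⟩
        · rw [hwchild] at hfalse; exact Bool.noConfusion hfalse
        · have hbitems : b ∈ items := pv_chain_mem h b hb
          have : (pvPid w).getD "" = pvId b := (pv_childF_mem items b w hwb).2.2
          have hby : b = y := pv_inj items hnd hbitems hyitems (this ▸ hwpid)
          exact ihx y hy (hby ▸ hb)

theorem pv_chain_nodup {items : List (List (String × String))}
    (hnd : (items.map pvId).Nodup) {l} (h : PvChain items l) : l.Nodup := by
  induction h with
  | root x hx hr => simp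
  | step y x ch h hy ih =>
      exact List.nodup_cons.mpr ⟨pv_chain_fresh hnd h y hy, ih⟩

theorem pv_chain_length {items : List (List (String × String))}
    (hnd : (items.map pvId).Nodup) {l} (h : PvChain items l) : l.length ≤ items.length :=
  ((pv_chain_nodup hnd h).subperm (fun _ ha => pv_chain_mem h _ ha)).length_le

-- the DFS only reads the dict through getD
theorem pv_dfs_congr (cm1 cm2 : PySem.Dict String (List (List (String × String))))
    (hg : ∀ c, cm1.getD c [] = cm2.getD c []) :
    ∀ f x res, pvDfsA cm1 f x res = pvDfsA cm2 f x res := by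
  intro f
  induction f with
  | zero => intro x res; rfl
  | succ f ih =>
      intro x res
      simp only [pvDfsA]
      rw [hg (pvId x)]
      exact PySem.List.foldl_congr_mem _ _ _ _ (fun acc c _ => ih c acc)

-- the result accumulator only ever grows on the right
theorem pv_acc (cm : PySem.Dict String (List (List (String × String)))) :
    ∀ f x res, pvDfsA cm f x res = res ++ pvDfsA cm f x [] := by
  intro f
  induction f with
  | zero => intro x res; simp [pvDfsA]
  | succ f ih =>
      have hfold : ∀ (l : List (List (String × String))) res,
          l.foldl (fun r c => pvDfsA cm f c r) res
            = res ++ l.flatMap (fun c => pvDfsA cm f c []) := by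
        intro l
        induction l with
        | nil => intro res; simp
        | cons c l ihl =>
            intro res
            simp only [List.foldl_cons, List.flatMap_cons]
            rw [ihl, ih c res, List.append_assoc]
      intro x res
      simp only [pvDfsA]
      rw [hfold _ (res ++ [x]), hfold _ ([] ++ [x])]
      simp

theorem pv_foldacc (cm : PySem.Dict String (List (List (String × String)))) (f : Nat) :
    ∀ (l : List (List (String × String))) res,
      l.foldl (fun r c => pvDfsA cm f c r) res = res ++ l.flatMap (fun c => pvDfsA cm f c []) := by
  intro l
  induction l with
  | nil => intro res; simp
  | cons c l ihl =>
      intro res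
      simp only [List.foldl_cons, List.flatMap_cons]
      rw [ihl, pv_acc cm f c res, List.append_assoc]

-- above the real recursion depth the fuel is irrelevant
theorem pv_dfs_fuel (items : List (List (String × String)))
    (cm : PySem.Dict String (List (List (String × String))))
    (hnd : (items.map pvId).Nodup) (hcm : ∀ c, cm.getD c [] = pvChl items c) :
    ∀ f g x ch res, PvChain items (x :: ch) →
      items.length + 1 ≤ f + (x :: ch).length → items.length + 1 ≤ g + (x :: ch).length →
      pvDfsA cm f x res = pvDfsA cm g x res := by
  intro f
  induction f with
  | zero =>
      intro g x ch res hch hf hg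
      exfalso
      have := pv_chain_length hnd hch
      omega
  | succ f ih =>
      intro g x ch res hch hf hg
      have hlen := pv_chain_length hnd hch
      obtain ⟨g', rfl⟩ : ∃ g', g = g' + 1 := ⟨g - 1, by omega⟩
      simp only [pvDfsA]
      rw [hcm (pvId x)]
      refine PySem.List.foldl_congr_mem _ _ _ _ ?_
      intro acc c hc
      have hch' : PvChain items (c :: x :: ch) := PvChain.step c x ch hch hc
      exact ih g' c (x :: ch) acc hch'
        (by simp only [List.length_cons] at hf ⊢; omega)
        (by simp only [List.length_cons] at hg ⊢; omega)

-- one pre-order step of the DFS at full fuel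
theorem pv_dfs_unfold (items : List (List (String × String)))
    (cm : PySem.Dict String (List (List (String × String))))
    (hnd : (items.map pvId).Nodup) (hcm : ∀ c, cm.getD c [] = pvChl items c)
    {x ch} (hch : PvChain items (x :: ch)) :
    pvDfsA cm (items.length + 1) x []
      = x :: (pvChildF items x).flatMap (fun c => pvDfsA cm (items.length + 1) c []) := by
  have hlen := pv_chain_length hnd hch
  have hstep : pvDfsA cm (items.length + 1) x []
      = (cm.getD (pvId x) []).foldl (fun r c => pvDfsA cm items.length c r) ([] ++ [x]) := rfl
  rw [hstep, hcm (pvId x), pv_foldacc]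
  have hfm : (pvChildF items x).flatMap (fun c => pvDfsA cm items.length c [])
      = (pvChildF items x).flatMap (fun c => pvDfsA cm (items.length + 1) c []) := by
    refine List.flatMap_congr ?_
    intro c hc
    exact pv_dfs_fuel items cm hnd hcm items.length (items.length + 1) c (x :: ch) []
      (PvChain.step c x ch hch hc)
      (by simp only [List.length_cons]; omega)
      (by simp only [List.length_cons]; omega)
  unfold pvChildF at hfm
  rw [hfm]
  unfold pvChildF
  simp

-- children lists are short
theorem pv_childF_length (items : List (List (String × String))) (x : List (String × String)) :
    (pvChildF items x).length ≤ items.length := by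
  unfold pvChildF pvChl
  rw [PySem.List.length_sorted]
  exact le_trans (List.length_filter_le _ _) (List.length_filter_le _ _)

-- crude but provable bound on the emitted subtree size
theorem pv_dfs_size (items : List (List (String × String)))
    (cm : PySem.Dict String (List (List (String × String))))
    (hnd : (items.map pvId).Nodup) (hcm : ∀ c, cm.getD c [] = pvChl items c) :
    ∀ k x ch, PvChain items (x :: ch) → items.length + 1 ≤ k + (x :: ch).length →
      (pvDfsA cm (items.length + 1) x []).length ≤ (items.length + 1) ^ k := by
  intro k
  induction k with
  | zero =>
      intro x ch hch hk
      exfalso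
      have := pv_chain_length hnd hch
      omega
  | succ k ih =>
      intro x ch hch hk
      rw [pv_dfs_unfold items cm hnd hcm hch]
      simp only [List.length_cons, List.length_flatMap]
      have hbound : ∀ v ∈ (pvChildF items x).map
          (fun c => (pvDfsA cm (items.length + 1) c []).length), v ≤ (items.length + 1) ^ k := by
        intro v hv
        obtain ⟨c, hc, rfl⟩ := List.mem_map.mp hv
        exact ih c (x :: ch) (PvChain.step c x ch hch hc)
          (by simp only [List.length_cons] at hk ⊢; omega)
      have hsum := List.sum_le_card_nsmul _ _ hbound
      rw [List.length_map, smul_eq_mul] at hsum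
      have hchl := pv_childF_length items x
      have hK : 1 ≤ (items.length + 1) ^ k := Nat.one_le_pow _ _ (by omega)
      have h2 : (pvChildF items x).length * (items.length + 1) ^ k
          ≤ items.length * (items.length + 1) ^ k := Nat.mul_le_mul_right _ hchl
      have h3 : (items.length + 1) ^ (k + 1) = items.length * (items.length + 1) ^ k + (items.length + 1) ^ k := by
        rw [pow_succ]; ring
      omega

-- the stack loop emits the same pre-order as the recursion
theorem pv_loop_eq (items : List (List (String × String)))
    (cm : PySem.Dict String (List (List (String × String))))
    (hnd : (items.map pvId).Nodup) (hcm : ∀ c, cm.getD c [] = pvChl items c) :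
    ∀ f s out, (∀ x ∈ s, ∃ ch, PvChain items (x :: ch)) →
      (s.flatMap (fun x => pvDfsA cm (items.length + 1) x [])).length ≤ f →
      pvLoopB cm f s out = out ++ s.flatMap (fun x => pvDfsA cm (items.length + 1) x []) := by
  intro f
  induction f with
  | zero =>
      intro s out hs hc
      cases s with
      | nil => simp [pvLoopB]
      | cons x rest =>
          exfalso
          obtain ⟨ch, hch⟩ := hs x (by simp)
          rw [List.flatMap_cons, pv_dfs_unfold items cm hnd hcm hch] at hc
          simp at hc
  | succ f ih =>
      intro s out hs hc
      cases s with
      | nil => simp [pvLoopB]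
      | cons x rest =>
          obtain ⟨ch, hch⟩ := hs x (by simp)
          simp only [pvLoopB]
          rw [hcm (pvId x)]
          have hstack : ∀ y ∈ pvChl items (pvId x) ++ rest, ∃ ch', PvChain items (y :: ch') := by
            intro y hy
            rcases List.mem_append.mp hy with hy' | hy'
            · exact ⟨x :: ch, PvChain.step y x ch hch hy'⟩
            · exact hs y (List.mem_cons_of_mem _ hy')
          have hcost : ((pvChl items (pvId x) ++ rest).flatMap
              (fun y => pvDfsA cm (items.length + 1) y [])).length ≤ f := by
            rw [List.flatMap_cons, pv_dfs_unfold items cm hnd hcm hch] at hc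
            unfold pvChildF at hc
            rw [List.flatMap_append]
            simp only [List.length_cons, List.length_append] at hc ⊢
            omega
          rw [ih _ _ hstack hcost]
          rw [List.flatMap_cons, pv_dfs_unfold items cm hnd hcm hch, List.flatMap_append]
          unfold pvChildF
          simp

-- A's single classification pass, split into its dict and its root list
theorem pv_stA (items : List (List (String × String))) :
    items.foldl
      (fun (st : PySem.Dict String (List (List (String × String))) × List (List (String × String))) it =>
        match pvPid it with
        | some pid =>
            if pid != "" && PySem.Set.contains (PySem.Set.ofList (items.map pvId)) pid then
              (st.1.modify pid [] (· ++ [it]), st.2)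
            else (st.1, st.2 ++ [it])
        | none => (st.1, st.2 ++ [it]))
      (PySem.Dict.empty, [])
      = (pvCmPre items, pvRoots items) := by
  rw [PySem.List.foldl_congr_mem _ _ _ _
    (fun acc it _ => pv_stepA_eq (PySem.Set.ofList (items.map pvId)) acc it)]
  rw [pv_pair_fold (pvIsChild (PySem.Set.ofList (items.map pvId)))
    (fun m it => m.modify ((pvPid it).getD "") [] (· ++ [it])) items PySem.Dict.empty []]
  unfold pvCmPre pvRoots pvIds
  rw [PySem.List.foldl_if_eq_foldl_filter]
  simp

theorem pv_portA (items : List (List (String × String))) :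
    reorder_with_children_py items
      = (pvRoots items).foldl (fun res root => pvDfsA (pvCmA items) (items.length + 1) root res) [] := by
  simp only [reorder_with_children_py]
  rw [pv_stA items]
  rfl

theorem pv_portB (items : List (List (String × String))) :
    reorder_with_children_py_alt items
      = pvLoopB (pvCmB items) ((items.length + 1) ^ (items.length + 2)) (pvRoots items) [] := rfl

theorem pv_roots_chain (items : List (List (String × String))) :
    ∀ x ∈ pvRoots items, ∃ ch, PvChain items (x :: ch) := by
  intro x hx
  unfold pvRoots at hx
  rw [List.mem_filter] at hx
  exact ⟨[], PvChain.root x hx.1 (by simpa using hx.2)⟩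

-- ===== VERDICT (by name: the statement is the Claim_ definition above) =====
theorem reorder_with_children_py_spec : Claim_equal_reorder_with_children_py := by
  intro items hdom hpre
  obtain ⟨hid, hnd⟩ := hpre
  unfold Spec_reorder_with_children_py
  rw [pv_portA items, pv_portB items, pv_foldacc]
  have hcmA := pv_cmA_getD items
  have hcmB := pv_cmB_getD items
  have hsize : ∀ x ∈ pvRoots items,
      (pvDfsA (pvCmB items) (items.length + 1) x []).length ≤ (items.length + 1) ^ items.length := by
    intro x hx
    obtain ⟨ch, hch⟩ := pv_roots_chain items x hx
    cases ch with
    | nil =>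
        exact pv_dfs_size items (pvCmB items) hnd hcmB items.length x [] hch
          (by simp)
    | cons a ch' =>
        exact pv_dfs_size items (pvCmB items) hnd hcmB items.length x (a :: ch') hch
          (by simp only [List.length_cons]; omega)
  have hcost : ((pvRoots items).flatMap
      (fun x => pvDfsA (pvCmB items) (items.length + 1) x [])).length
        ≤ (items.length + 1) ^ (items.length + 2) := by
    rw [List.length_flatMap]
    have hs := List.sum_le_card_nsmul
      ((pvRoots items).map (fun x => (pvDfsA (pvCmB items) (items.length + 1) x []).length))
      ((items.length + 1) ^ items.length)
      (by
        intro v hv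
        obtain ⟨x, hx, rfl⟩ := List.mem_map.mp hv
        exact hsize x hx)
    rw [List.length_map, smul_eq_mul] at hs
    have h1 : (pvRoots items).length ≤ items.length := List.length_filter_le _ _
    have h2 : (items.length + 1) ^ (items.length + 2)
        = (items.length + 1) ^ items.length * ((items.length + 1) * (items.length + 1)) := by
      rw [pow_add]; ring
    have h3 : (pvRoots items).length * (items.length + 1) ^ items.length
        ≤ items.length * (items.length + 1) ^ items.length :=
      Nat.mul_le_mul_right _ h1
    have h4 : items.length * (items.length + 1) ^ items.length
        ≤ ((items.length + 1) * (items.length + 1)) * (items.length + 1) ^ items.length :=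
      Nat.mul_le_mul_right _ (by nlinarith)
    calc ((pvRoots items).map
          (fun x => (pvDfsA (pvCmB items) (items.length + 1) x []).length)).sum
        ≤ (pvRoots items).length * (items.length + 1) ^ items.length := hs
      _ ≤ ((items.length + 1) * (items.length + 1)) * (items.length + 1) ^ items.length := le_trans h3 h4
      _ = (items.length + 1) ^ (items.length + 2) := by rw [h2]; ring
  rw [pv_loop_eq items (pvCmB items) hnd hcmB _ _ [] (pv_roots_chain items) hcost]
  simp only [List.nil_append]
  exact List.flatMap_congr (fun x _ =>
    pv_dfs_congr (pvCmA items) (pvCmB items)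
      (fun c => (hcmA c).trans (hcmB c).symm) (items.length + 1) x [])
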